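-- pv_equiv track=rewrite | github.com/andreovstedal/JHAgenerator | app.py | get_work_type_requirements
-- ===== SOURCE A (Python) =====
-- def get_work_type_requirements(work_types):
--     """Get requirements based on selected work types - simplified version"""
--     requirements = {
--         "procedures": [],
--         "permits": [],
--         "special_considerations": [],
--         "equipment": [],
--         "roles": []
--     }
--
--     for work_type in work_types:
--         if "LOTO" in work_type:
--             requirements["procedures"].append("LOTO Procedure: Lock out, tag out all energy sources")
--             requirements["roles"].append("Isolation Officer")
--             requirements["special_considerations"].append("Verify zero energy state before work")
--
--         elif "Working Aloft" in work_type or "Overside" in work_type: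
--             requirements["equipment"].append("Fall arrest harness and equipment")
--             requirements["procedures"].append("Working at Height Procedure: Maintain 100% tie-off")
--
--         elif "Critical" in work_type:
--             requirements["procedures"].append("Critical Equipment Procedure")
--             requirements["roles"].append("Technical Responsible Person")
--
--         elif "Enclosed Space" in work_type:
--             requirements["equipment"].append("Gas detector and ventilation equipment")
--             requirements["procedures"].append("Entry/Exit Control Procedure")
--
--         elif any(hw in work_type for hw in ["Hot Work", "Welding", "Cutting", "Grinding"]):
--             requirements["procedures"].append("Hot Work Procedure and Fire Watch")
--             requirements["special_considerations"].append("Fire sensor inhibition may be required")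
--
--     return requirements
-- ===== SOURCE B (Python) =====
-- # Two-phase re-implementation: first classify every work type into a hazard
-- # class (or None), then assemble each category list independently by
-- # comprehension over the classes; the result dict is built once at the end
-- # (no per-item dict mutation).
--
-- _KEYWORDS = [
--     ["LOTO"],
--     ["Working Aloft", "Overside"],
--     ["Critical"],
--     ["Enclosed Space"],
--     ["Hot Work", "Welding", "Cutting", "Grinding"],
-- ]
--
-- _PROCEDURES = {
--     0: "LOTO Procedure: Lock out, tag out all energy sources",
--     1: "Working at Height Procedure: Maintain 100% tie-off",
--     2: "Critical Equipment Procedure",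
--     3: "Entry/Exit Control Procedure",
--     4: "Hot Work Procedure and Fire Watch",
-- }
-- _SPECIAL = {
--     0: "Verify zero energy state before work",
--     4: "Fire sensor inhibition may be required",
-- }
-- _EQUIPMENT = {
--     1: "Fall arrest harness and equipment",
--     3: "Gas detector and ventilation equipment",
-- }
-- _ROLES = {
--     0: "Isolation Officer",
--     2: "Technical Responsible Person",
-- }
--
--
-- def _classify(work_type):
--     return next((i for i, kws in enumerate(_KEYWORDS)
--                  if any(k in work_type for k in kws)), None)
--
--
-- def get_work_type_requirements(work_types):
--     labels = [_classify(wt) for wt in work_types]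
--     return {
--         "procedures": [_PROCEDURES[l] for l in labels if l in _PROCEDURES],
--         "permits": [],
--         "special_considerations": [_SPECIAL[l] for l in labels if l in _SPECIAL],
--         "equipment": [_EQUIPMENT[l] for l in labels if l in _EQUIPMENT],
--         "roles": [_ROLES[l] for l in labels if l in _ROLES],
--     }
-- ===== Notes on version B (the rewrite author's own statement) =====
-- stated objective: alternative
-- what changed: Instead of one pass that mutates a result dict through an if/elif ladder, B first classifies every work type into a hazard class, then builds each of the five category lists independently by comprehension over per-category message tables, constructing the result dict once at the end.
import Mathlib
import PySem

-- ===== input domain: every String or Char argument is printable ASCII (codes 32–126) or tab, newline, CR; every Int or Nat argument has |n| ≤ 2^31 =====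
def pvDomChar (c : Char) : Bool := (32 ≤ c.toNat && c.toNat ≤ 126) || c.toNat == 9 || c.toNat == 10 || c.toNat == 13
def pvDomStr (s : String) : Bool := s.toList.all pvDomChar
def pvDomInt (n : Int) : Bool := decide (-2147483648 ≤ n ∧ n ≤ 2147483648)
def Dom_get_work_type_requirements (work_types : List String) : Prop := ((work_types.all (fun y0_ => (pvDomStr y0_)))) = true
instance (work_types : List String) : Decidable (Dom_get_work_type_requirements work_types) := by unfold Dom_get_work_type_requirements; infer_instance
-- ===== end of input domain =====

-- B replaces A's single mutating pass (if/elif ladder appending into a dict) by a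
-- two-phase scheme: classify every work type once, then build each category list
-- independently by comprehension; same asymptotic cost, different decomposition.

-- ===== PORT A =====
-- the initial dict literal (A's first statement)
def gwtrInit : PySem.Dict String (List String) :=
  PySem.Dict.mk [("procedures", []), ("permits", []), ("special_considerations", []),
                 ("equipment", []), ("roles", [])]

-- one iteration of A's for-loop body (the if/elif ladder); d[k].append(x) = modify k [] (· ++ [x]),
-- exact here since every key used is present in the dict
def gwtrStepA (req : PySem.Dict String (List String)) (wt : String) : PySem.Dict String (List String) :=
  if PySem.Str.isIn "LOTO" wt then
    ((req.modify "procedures" [] (· ++ ["LOTO Procedure: Lock out, tag out all energy sources"])).modify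
        "roles" [] (· ++ ["Isolation Officer"])).modify
        "special_considerations" [] (· ++ ["Verify zero energy state before work"])
  else if PySem.Str.isIn "Working Aloft" wt || PySem.Str.isIn "Overside" wt then
    (req.modify "equipment" [] (· ++ ["Fall arrest harness and equipment"])).modify
        "procedures" [] (· ++ ["Working at Height Procedure: Maintain 100% tie-off"])
  else if PySem.Str.isIn "Critical" wt then
    (req.modify "procedures" [] (· ++ ["Critical Equipment Procedure"])).modify
        "roles" [] (· ++ ["Technical Responsible Person"])
  else if PySem.Str.isIn "Enclosed Space" wt then
    (req.modify "equipment" [] (· ++ ["Gas detector and ventilation equipment"])).modify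
        "procedures" [] (· ++ ["Entry/Exit Control Procedure"])
  else if (["Hot Work", "Welding", "Cutting", "Grinding"] : List String).any (fun hw => PySem.Str.isIn hw wt) then
    (req.modify "procedures" [] (· ++ ["Hot Work Procedure and Fire Watch"])).modify
        "special_considerations" [] (· ++ ["Fire sensor inhibition may be required"])
  else req

def get_work_type_requirements (work_types : List String) : List (String × List String) :=
  (work_types.foldl gwtrStepA gwtrInit).items

-- ===== PORT B =====
-- _KEYWORDS: one keyword list per hazard class
def gwtrKeywords : List (List String) :=
  [ ["LOTO"],
    ["Working Aloft", "Overside"],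
    ["Critical"],
    ["Enclosed Space"],
    ["Hot Work", "Welding", "Cutting", "Grinding"] ]

-- the four per-category message tables (dicts keyed by hazard class)
def gwtrProc : PySem.Dict Int String :=
  PySem.Dict.mk
    [ (0, "LOTO Procedure: Lock out, tag out all energy sources"),
      (1, "Working at Height Procedure: Maintain 100% tie-off"),
      (2, "Critical Equipment Procedure"),
      (3, "Entry/Exit Control Procedure"),
      (4, "Hot Work Procedure and Fire Watch") ]

def gwtrSpecial : PySem.Dict Int String :=
  PySem.Dict.mk
    [ (0, "Verify zero energy state before work"),
      (4, "Fire sensor inhibition may be required") ]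

def gwtrEquip : PySem.Dict Int String :=
  PySem.Dict.mk
    [ (1, "Fall arrest harness and equipment"),
      (3, "Gas detector and ventilation equipment") ]

def gwtrRoles : PySem.Dict Int String :=
  PySem.Dict.mk
    [ (0, "Isolation Officer"),
      (2, "Technical Responsible Person") ]

-- _classify: index of the first keyword list with a hit, else None
def gwtrClassify (wt : String) : Option Int :=
  (PySem.List.enumerate gwtrKeywords).findSome?
    (fun p => if p.2.any (fun k => PySem.Str.isIn k wt) then some p.1 else none)

-- [tbl[l] for l in labels if l in tbl]  (l may be None, which is never a key)
def gwtrPick (tbl : PySem.Dict Int String) (labels : List (Option Int)) : List String :=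
  labels.filterMap (fun l => l.bind tbl.get?)

def get_work_type_requirements_alt (work_types : List String) : List (String × List String) :=
  let labels := work_types.map gwtrClassify
  [ ("procedures", gwtrPick gwtrProc labels),
    ("permits", []),
    ("special_considerations", gwtrPick gwtrSpecial labels),
    ("equipment", gwtrPick gwtrEquip labels),
    ("roles", gwtrPick gwtrRoles labels) ]

-- ===== PRECONDITION & SPEC =====
def Spec_get_work_type_requirements (work_types : List String) (out : List (String × List String)) : Prop := out = get_work_type_requirements_alt work_types
instance (work_types : List String) (out : List (String × List String)) : Decidable (Spec_get_work_type_requirements work_types out) := by unfold Spec_get_work_type_requirements; infer_instance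

-- ===== CLAIM =====
def Claim_equal_get_work_type_requirements : Prop := ∀ (work_types : List String), Dom_get_work_type_requirements work_types → Spec_get_work_type_requirements work_types (get_work_type_requirements work_types)

-- ===== LEMMAS AND PROOFS =====

-- the dict A's loop maintains, expressed through B's category lists of the prefix
def gwtrBuild (labels : List (Option Int)) : PySem.Dict String (List String) :=
  PySem.Dict.mk
    [ ("procedures", gwtrPick gwtrProc labels),
      ("permits", []),
      ("special_considerations", gwtrPick gwtrSpecial labels),
      ("equipment", gwtrPick gwtrEquip labels),
      ("roles", gwtrPick gwtrRoles labels) ]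

theorem gwtrPick_append (tbl : PySem.Dict Int String) (L : List (Option Int)) (x : Option Int) :
    gwtrPick tbl (L ++ [x]) = gwtrPick tbl L ++ (x.bind tbl.get?).toList := by
  cases x with
  | none => simp [gwtrPick]
  | some i => cases h : tbl.get? i <;> simp [gwtrPick, h]

-- one iteration of A's ladder on the invariant dict = extending the label list by one
theorem gwtrStep_build (L : List (Option Int)) (w : String) :
    gwtrStepA (gwtrBuild L) w = gwtrBuild (L ++ [gwtrClassify w]) := by
  simp only [gwtrStepA, gwtrClassify, gwtrKeywords, PySem.List.enumerate_cons,
    PySem.List.enumerate_nil, List.findSome?_cons, List.findSome?_nil,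
    List.any_cons, List.any_nil, Bool.or_false]
  cases h0 : PySem.Str.isIn "LOTO" w <;>
  cases h1 : PySem.Str.isIn "Working Aloft" w || PySem.Str.isIn "Overside" w <;>
  cases h2 : PySem.Str.isIn "Critical" w <;>
  cases h3 : PySem.Str.isIn "Enclosed Space" w <;>
  cases h4 : PySem.Str.isIn "Hot Work" w || (PySem.Str.isIn "Welding" w ||
      (PySem.Str.isIn "Cutting" w || PySem.Str.isIn "Grinding" w)) <;>
  simp only [h0, h1, h2, h3, h4, if_true, if_false, Bool.false_eq_true] <;>
  · apply PySem.Dict.ext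
    simp [gwtrBuild, gwtrPick_append, PySem.Dict.modify, PySem.Dict.get?, PySem.Dict.getD,
      PySem.Dict.insert, gwtrProc, gwtrSpecial, gwtrEquip, gwtrRoles,
      Option.toList]

-- A's whole loop equals B's build of the classified list
theorem gwtrFold_build (ws : List String) :
    ws.foldl gwtrStepA gwtrInit = gwtrBuild (ws.map gwtrClassify) := by
  induction ws using List.reverseRecOn with
  | nil => rfl
  | append_singleton ws w ih =>
      rw [List.foldl_append, List.foldl_cons, List.foldl_nil, ih, gwtrStep_build,
        List.map_append]
      rfl

-- ===== VERDICT =====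
theorem get_work_type_requirements_spec : Claim_equal_get_work_type_requirements := by
  intro work_types _
  unfold Spec_get_work_type_requirements get_work_type_requirements get_work_type_requirements_alt
  rw [gwtrFold_build]
  rfl
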